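-- pv_equiv track=rewrite | github.com/jcollera/Decryper | consts.py | generate_dict_mask
-- ===== SOURCE A (Python) =====
-- def generate_dict_mask(dictionary, count=1):
--     mask = {}
--     for key in dictionary:
--         mask[key] = str(count)
--         count = count + 1
--
--     for key in dictionary:
--         list_of_words = dictionary[key]
--         for word in list_of_words:
--             for letter in word:
--                 if letter not in mask:
--                     mask[letter] = str(count)
--                     count = count + 1
--     return mask
-- ===== SOURCE B (Python) =====
-- def generate_dict_mask(dictionary, count=1):
--     # flatten words to a letter list filtered against the keys, dedupe with set(),
--     # recover the first-seen order by sorting on first occurrence, number everything at once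
--     keys = list(dictionary)
--     keyset = set(keys)
--     letters = [c for ws in dictionary.values() for w in ws for c in w if c not in keyset]
--     fresh = sorted(set(letters), key=letters.index)
--     return {tok: str(count + i) for i, tok in enumerate(keys + fresh)}
-- ===== Notes on version B (the rewrite author's own statement) =====
-- stated objective: alternative
-- what changed: Instead of scanning with an inline counter and dict-membership test, B flattens all words into one letter list filtered against the key set, deduplicates it with set(), orders the distinct letters by SORTING on their first-occurrence index (letters.index), and numbers keys+letters in a single enumerate pass.
import Mathlib
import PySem

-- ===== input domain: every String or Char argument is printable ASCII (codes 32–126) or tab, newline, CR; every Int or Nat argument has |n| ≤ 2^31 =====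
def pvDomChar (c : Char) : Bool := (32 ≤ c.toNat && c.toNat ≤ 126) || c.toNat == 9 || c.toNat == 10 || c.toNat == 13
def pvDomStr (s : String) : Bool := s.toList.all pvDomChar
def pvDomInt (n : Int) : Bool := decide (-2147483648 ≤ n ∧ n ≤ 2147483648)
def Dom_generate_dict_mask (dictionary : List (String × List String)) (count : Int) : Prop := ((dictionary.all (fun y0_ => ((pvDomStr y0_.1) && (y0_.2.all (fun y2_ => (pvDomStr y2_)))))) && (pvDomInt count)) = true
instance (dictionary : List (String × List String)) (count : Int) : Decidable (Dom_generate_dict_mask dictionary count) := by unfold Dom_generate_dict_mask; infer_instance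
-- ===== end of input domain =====

-- B replaces A's counter-threaded insertion scan by set algebra: flatten all words into one
-- letter list filtered against the key set, deduplicate it with set(), order the distinct
-- letters by SORTING on their first-occurrence index, and number keys+letters in one pass.

-- ===== PORT A =====
-- A receives a Python dict; the assoc-list argument is viewed through PySem.Dict.ofList
-- (insertion order, last value wins), then A's loops are transliterated step for step.
def generate_dict_mask (dictionary : List (String × List String)) (count : Int) : List (String × String) :=
  let d := PySem.Dict.ofList dictionary
  -- first loop: for key in dictionary: mask[key] = str(count); count += 1
  let st1 := d.keys.foldl
    (fun (st : PySem.Dict String String × Int) key =>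
      (st.1.insert key (PySem.Int.toStr st.2), st.2 + 1))
    (PySem.Dict.empty, count)
  -- second loop nest over keys / words / letters
  let st2 := d.keys.foldl
    (fun st key =>
      (d.getD key []).foldl
        (fun st word =>
          word.toList.foldl
            (fun (st : PySem.Dict String String × Int) letter =>
              if st.1.contains letter.toString then st
              else (st.1.insert letter.toString (PySem.Int.toStr st.2), st.2 + 1))
            st)
        st)
    st1
  st2.1.items

-- ===== PORT B =====
def generate_dict_mask_alt (dictionary : List (String × List String)) (count : Int) : List (String × String) :=
  let d := PySem.Dict.ofList dictionary
  let keys := d.keys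
  let keyset := PySem.Set.ofList keys
  -- letters = [c for ws in dictionary.values() for w in ws for c in w if c not in keyset]
  let letters : List String :=
    ((d.values.flatMap (fun ws => ws.flatMap (fun w => w.toList))).filter
      (fun c => !(PySem.Set.contains keyset c.toString))).map Char.toString
  -- fresh = sorted(set(letters), key=letters.index); every sorted element is in letters,
  -- so Python's .index never raises and the total '(index? …).getD 0' key is exact here
  let fresh := PySem.List.sorted (PySem.Set.ofList letters)
      (fun t => (PySem.List.index? letters t).getD 0) false
  -- {tok: str(count + i) for i, tok in enumerate(keys + fresh)}
  (PySem.Dict.ofList ((PySem.List.enumerate (keys ++ fresh) 0).map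
      (fun p => (p.2, PySem.Int.toStr (count + p.1))))).items

-- ===== PRECONDITION & SPEC =====
def Spec_generate_dict_mask (dictionary : List (String × List String)) (count : Int) (out : List (String × String)) : Prop := out = generate_dict_mask_alt dictionary count
instance (dictionary : List (String × List String)) (count : Int) (out : List (String × String)) : Decidable (Spec_generate_dict_mask dictionary count out) := by unfold Spec_generate_dict_mask; infer_instance

-- ===== CLAIM (what is proved, stated in full; the proofs are below) =====
def Claim_equal_generate_dict_mask : Prop := ∀ (dictionary : List (String × List String)) (count : Int), Dom_generate_dict_mask dictionary count → Spec_generate_dict_mask dictionary count (generate_dict_mask dictionary count)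

-- ===== LEMMAS AND PROOFS =====

-- numbering of a token list: the items of the mask once every token in `tk` has its label
def numb (c0 : Int) (tk : List String) : List (String × String) :=
  (PySem.List.enumerate tk 0).map (fun p => (p.2, PySem.Int.toStr (c0 + p.1)))

-- A's letter step viewed on the token list alone (it is Python's set.add on strings)
def fBc (tk : List String) (letter : Char) : List String :=
  PySem.Set.add tk letter.toString
def fBw (tk : List String) (word : String) : List String := word.toList.foldl fBc tk
def fBi (tk : List String) (words : List String) : List String := words.foldl fBw tk

theorem numb_snoc (c0 : Int) (tk : List String) (t : String) :
    numb c0 (tk ++ [t]) = numb c0 tk ++ [(t, PySem.Int.toStr (c0 + tk.length))] := by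
  simp [numb, PySem.List.enumerate_append, PySem.List.enumerate_cons, PySem.List.enumerate_nil]

theorem map_fst_numb (c0 : Int) (tk : List String) :
    (numb c0 tk).map Prod.fst = tk := by
  simp only [numb, List.map_map]
  exact PySem.List.map_snd_enumerate tk 0

theorem contains_numb (c0 : Int) (tk : List String) (s : String) :
    (PySem.Dict.mk (numb c0 tk)).contains s = decide (s ∈ tk) := by
  rw [PySem.Dict.contains_eq_decide_mem_keys]
  rw [show (PySem.Dict.mk (numb c0 tk)).keys = (numb c0 tk).map Prod.fst from rfl]
  rw [map_fst_numb]

-- generic lifting: if one step preserves the (mask, counter) ↔ tokens correspondence, so does a fold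
theorem liftFold {β : Type}
    (fA : PySem.Dict String String × Int → β → PySem.Dict String String × Int)
    (fB : List String → β → List String)
    (h : ∀ (b : β) (c0 : Int) (tk : List String), tk.Nodup →
      fA (PySem.Dict.mk (numb c0 tk), c0 + tk.length) b
        = (PySem.Dict.mk (numb c0 (fB tk b)), c0 + (fB tk b).length) ∧ (fB tk b).Nodup) :
    ∀ (l : List β) (c0 : Int) (tk : List String), tk.Nodup →
      l.foldl fA (PySem.Dict.mk (numb c0 tk), c0 + tk.length)
        = (PySem.Dict.mk (numb c0 (l.foldl fB tk)), c0 + (l.foldl fB tk).length)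
        ∧ (l.foldl fB tk).Nodup := by
  intro l
  induction l with
  | nil => intro c0 tk htk; exact ⟨rfl, htk⟩
  | cons b l ih =>
    intro c0 tk htk
    obtain ⟨he, hn⟩ := h b c0 tk htk
    simp only [List.foldl_cons, he]
    exact ih c0 (fB tk b) hn

theorem nodup_snoc (tk : List String) (x : String) (htk : tk.Nodup) (hx : x ∉ tk) :
    (tk ++ [x]).Nodup := by
  simp [List.nodup_append, htk]
  intro a ha e
  exact hx (e ▸ ha)

-- one letter step of A matches the set-add step on the token list
theorem charStep (ch : Char) (c0 : Int) (tk : List String) (htk : tk.Nodup) :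
    (fun (st : PySem.Dict String String × Int) (letter : Char) =>
        if st.1.contains letter.toString then st
        else (st.1.insert letter.toString (PySem.Int.toStr st.2), st.2 + 1))
      (PySem.Dict.mk (numb c0 tk), c0 + tk.length) ch
    = (PySem.Dict.mk (numb c0 (fBc tk ch)), c0 + (fBc tk ch).length) ∧ (fBc tk ch).Nodup := by
  by_cases hm : ch.toString ∈ tk
  · have h1 : (PySem.Dict.mk (numb c0 tk)).contains ch.toString = true := by
      rw [contains_numb]; simpa
    have h2 : PySem.Set.contains tk ch.toString = true :=
      (PySem.Set.contains_iff tk ch.toString).mpr hm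
    simp only [fBc, PySem.Set.add, h1, h2, reduceIte]
    exact ⟨trivial, htk⟩
  · have h1 : (PySem.Dict.mk (numb c0 tk)).contains ch.toString = false := by
      rw [contains_numb]; simpa
    have h2 : PySem.Set.contains tk ch.toString = false := by
      rw [Bool.eq_false_iff]
      intro hc
      exact hm ((PySem.Set.contains_iff tk ch.toString).mp hc)
    refine ⟨?_, by simp only [fBc, PySem.Set.add, h2, Bool.false_eq_true, if_false]
                   exact nodup_snoc tk _ htk hm⟩
    simp only [fBc, PySem.Set.add, h1, h2, Bool.false_eq_true, if_false]
    rw [Prod.mk.injEq]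
    refine ⟨?_, ?_⟩
    · apply PySem.Dict.ext
      rw [PySem.Dict.items_insert_of_not_contains _ _ h1, numb_snoc]
    · simp only [List.length_append, List.length_cons, List.length_nil]
      push_cast
      omega

-- items of ofList when the keys are distinct: nothing is overwritten
theorem items_ofList_of_nodup (l : List (String × String)) (h : (l.map Prod.fst).Nodup) :
    (PySem.Dict.ofList l).items = l := by
  have hfresh : ∀ a ∈ l, (PySem.Dict.empty : PySem.Dict String String).contains a.1 = false := by
    intro a _; exact PySem.Dict.contains_empty a.1
  have := PySem.Dict.items_foldl_insert_fresh l (fun p => p.1) (fun p => p.2)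
    PySem.Dict.empty hfresh (by simpa using h)
  simpa [PySem.Dict.ofList, PySem.Dict.update, PySem.Dict.empty] using this

-- phase 1: inserting the (distinct) keys one by one builds the numbering of the key list
theorem phase1 : ∀ (l tk : List String) (c0 : Int), (tk ++ l).Nodup →
    l.foldl (fun (st : PySem.Dict String String × Int) key =>
        (st.1.insert key (PySem.Int.toStr st.2), st.2 + 1))
      (PySem.Dict.mk (numb c0 tk), c0 + tk.length)
    = (PySem.Dict.mk (numb c0 (tk ++ l)), c0 + (tk ++ l).length) := by
  intro l
  induction l with
  | nil => intro tk c0 _; simp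
  | cons k l ih =>
    intro tk c0 hnd
    have hk : k ∉ tk := fun hmem => (List.disjoint_of_nodup_append hnd) hmem (by simp)
    have hc : (PySem.Dict.mk (numb c0 tk)).contains k = false := by
      rw [contains_numb]; simpa
    rw [List.foldl_cons]
    have hstep : ((PySem.Dict.mk (numb c0 tk)).insert k (PySem.Int.toStr (c0 + tk.length)),
        c0 + (tk.length : Int) + 1)
        = (PySem.Dict.mk (numb c0 (tk ++ [k])), c0 + ((tk ++ [k]).length : Int)) := by
      rw [Prod.mk.injEq]
      refine ⟨?_, ?_⟩
      · apply PySem.Dict.ext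
        rw [PySem.Dict.items_insert_of_not_contains _ _ hc, numb_snoc]
      · simp only [List.length_append, List.length_cons, List.length_nil]
        push_cast
        omega
    rw [hstep]
    have := ih (tk ++ [k]) c0 (by simpa using hnd)
    rw [this]
    simp [List.append_assoc]

-- a nested fold is the fold over the flattened list
theorem foldl_flatMap' {α β γ : Type} (f : β → List γ) (step : α → γ → α) :
    ∀ (l : List β) (init : α),
      (l.flatMap f).foldl step init = l.foldl (fun acc x => (f x).foldl step acc) init := by
  intro l
  induction l with
  | nil => intro init; rfl
  | cons b l ih => intro init; simp [List.flatMap_cons, List.foldl_append, ih]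

-- splitting the seen set: letters already among the keys are exactly those the filter removes
theorem splitSeen : ∀ (l keys acc : List String), (∀ x ∈ acc, x ∉ keys) →
    l.foldl PySem.Set.add (keys ++ acc)
      = keys ++ (l.filter (fun s => decide (s ∉ keys))).foldl PySem.Set.add acc := by
  intro l
  induction l with
  | nil => intro keys acc _; rfl
  | cons s l ih =>
    intro keys acc hd
    by_cases hk : s ∈ keys
    · simp only [List.foldl_cons, List.filter_cons]
      rw [show (decide (s ∉ keys)) = false by simpa]
      simp only [Bool.false_eq_true, if_false]
      rw [PySem.Set.add_of_mem (List.mem_append_left acc hk)]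
      exact ih keys acc hd
    · simp only [List.foldl_cons, List.filter_cons]
      rw [show (decide (s ∉ keys)) = true by simpa]
      simp only [if_true]
      by_cases ha : s ∈ acc
      · rw [PySem.Set.add_of_mem (List.mem_append_right keys ha), List.foldl_cons,
            PySem.Set.add_of_mem ha]
        exact ih keys acc hd
      · have hm : s ∉ keys ++ acc := by
          intro h
          rcases List.mem_append.mp h with h | h
          · exact hk h
          · exact ha h
        rw [PySem.Set.add_of_not_mem hm, List.foldl_cons, PySem.Set.add_of_not_mem ha,
            List.append_assoc]
        exact ih keys (acc ++ [s]) (by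
          intro x hx
          rcases List.mem_append.mp hx with h | h
          · exact hd x h
          · simpa [List.mem_singleton.mp h] using hk)

-- set(l) appends snoc-wise
theorem ofList_snoc (l : List String) (c : String) :
    PySem.Set.ofList (l ++ [c]) = PySem.Set.add (PySem.Set.ofList l) c := by
  rw [PySem.Set.ofList_eq_foldl, PySem.Set.ofList_eq_foldl, List.foldl_append]
  rfl

-- first-seen dedup is strictly increasing in the first-occurrence index
theorem pairwise_index_ofList (l : List String) :
    (PySem.Set.ofList l).Pairwise
      (fun a b => ((PySem.List.index? l a).getD 0) < ((PySem.List.index? l b).getD 0)) := by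
  induction l using List.reverseRecOn with
  | nil => simp [PySem.Set.ofList_eq_foldl]
  | append_singleton l c ih =>
    rw [ofList_snoc]
    have hsub : ∀ x ∈ PySem.Set.ofList l, x ∈ l :=
      fun x hx => (PySem.Set.mem_ofList l x).mp hx
    have hkeep : ∀ x ∈ l, PySem.List.index? (l ++ [c]) x = PySem.List.index? l x :=
      fun x hx => PySem.List.index?_append_of_mem [c] hx
    by_cases hc : c ∈ l
    · rw [PySem.Set.add_of_mem ((PySem.Set.mem_ofList l c).mpr hc)]
      exact List.Pairwise.imp_of_mem
        (fun {a b} ha hb h => by rwa [hkeep a (hsub a ha), hkeep b (hsub b hb)]) ih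
    · rw [PySem.Set.add_of_not_mem (fun h => hc (hsub c h))]
      rw [List.pairwise_append]
      refine ⟨List.Pairwise.imp_of_mem
        (fun {a b} ha hb h => by rwa [hkeep a (hsub a ha), hkeep b (hsub b hb)]) ih,
        by simp, ?_⟩
      intro a ha b hb
      rw [List.mem_singleton.mp hb]
      have haL : a ∈ l := hsub a ha
      rw [hkeep a haL, PySem.List.index?_append_singleton_self l c hc]
      obtain ⟨k, hk⟩ := Option.isSome_iff_exists.mp
        ((PySem.List.index?_isSome_iff l a).mpr haL)
      obtain ⟨hlt, -⟩ := PySem.List.getElem_of_index?_eq_some hk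
      rw [hk]
      simpa using hlt

-- ===== VERDICT (by name: the statement is the Claim_ definition above) =====
theorem generate_dict_mask_spec : Claim_equal_generate_dict_mask := by
  intro dictionary count _
  unfold Spec_generate_dict_mask
  simp only [generate_dict_mask, generate_dict_mask_alt]
  set d := PySem.Dict.ofList dictionary with hd
  have hnd : d.keys.Nodup := PySem.Dict.nodup_keys_ofList dictionary
  -- phase 1 of A
  have h0 : ((PySem.Dict.empty : PySem.Dict String String), count)
      = (PySem.Dict.mk (numb count []), count + (([] : List String).length : Int)) := by
    rw [Prod.mk.injEq]
    exact ⟨rfl, by simp⟩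
  rw [h0, phase1 d.keys [] count (by simpa using hnd)]
  simp only [List.nil_append]
  -- A's phase-2 loop looks the word lists up in d; over the distinct keys that is the value
  have hgetD : ∀ (st : PySem.Dict String String × Int),
      d.keys.foldl (fun st key =>
        (d.getD key []).foldl (fun st word =>
          word.toList.foldl (fun (st : PySem.Dict String String × Int) letter =>
            if st.1.contains letter.toString then st
            else (st.1.insert letter.toString (PySem.Int.toStr st.2), st.2 + 1)) st) st) st
      = d.items.foldl (fun st kv =>
          kv.2.foldl (fun st word =>
            word.toList.foldl (fun (st : PySem.Dict String String × Int) letter =>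
              if st.1.contains letter.toString then st
              else (st.1.insert letter.toString (PySem.Int.toStr st.2), st.2 + 1)) st) st) st := by
    intro st
    rw [show d.keys = d.items.map Prod.fst from rfl, List.foldl_map]
    exact PySem.List.foldl_congr_mem d.items _ _ st
      (fun acc kv hkv => by
        rw [PySem.Dict.getD_of_mem_items d (by simpa using hkv) hnd []])
  rw [hgetD]
  -- lift A's phase 2 to the pure token-list fold fBi
  have hw : ∀ (w : String) (c0 : Int) (tk : List String), tk.Nodup →
      (fun (st : PySem.Dict String String × Int) (word : String) =>
          word.toList.foldl (fun (st : PySem.Dict String String × Int) letter =>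
            if st.1.contains letter.toString then st
            else (st.1.insert letter.toString (PySem.Int.toStr st.2), st.2 + 1)) st)
        (PySem.Dict.mk (numb c0 tk), c0 + tk.length) w
      = (PySem.Dict.mk (numb c0 (fBw tk w)), c0 + (fBw tk w).length) ∧ (fBw tk w).Nodup :=
    fun w c0 tk htk => liftFold _ fBc charStep w.toList c0 tk htk
  have hitems : ∀ (kv : String × List String) (c0 : Int) (tk : List String), tk.Nodup →
      (fun (st : PySem.Dict String String × Int) (kv : String × List String) =>
          kv.2.foldl (fun st word =>
            word.toList.foldl (fun (st : PySem.Dict String String × Int) letter =>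
              if st.1.contains letter.toString then st
              else (st.1.insert letter.toString (PySem.Int.toStr st.2), st.2 + 1)) st) st)
        (PySem.Dict.mk (numb c0 tk), c0 + tk.length) kv
      = (PySem.Dict.mk (numb c0 (fBi tk kv.2)), c0 + (fBi tk kv.2).length) ∧ (fBi tk kv.2).Nodup :=
    fun kv c0 tk htk => liftFold _ fBw hw kv.2 c0 tk htk
  obtain ⟨hmainEq, hmainNd⟩ :=
    liftFold
      (fun (st : PySem.Dict String String × Int) (kv : String × List String) =>
          kv.2.foldl (fun st word =>
            word.toList.foldl (fun (st : PySem.Dict String String × Int) letter =>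
              if st.1.contains letter.toString then st
              else (st.1.insert letter.toString (PySem.Int.toStr st.2), st.2 + 1)) st) st)
      (fun tk (kv : String × List String) => fBi tk kv.2) hitems d.items count d.keys hnd
  rw [hmainEq]
  -- the token list A accumulates, flattened to a single fold over all letters
  set T := d.items.foldl (fun tk (kv : String × List String) => fBi tk kv.2) d.keys with hT
  set C : List Char := d.items.flatMap (fun kv => kv.2.flatMap (fun w => w.toList)) with hC
  have hflat : T = (C.map Char.toString).foldl PySem.Set.add d.keys := by
    rw [hT, hC, List.foldl_map, foldl_flatMap']
    refine PySem.List.foldl_congr_mem d.items _ _ d.keys (fun acc kv _ => ?_)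
    rw [foldl_flatMap']
    rfl
  -- B's letter list is the filtered flattened stream
  have hCvals : d.values.flatMap (fun ws => ws.flatMap (fun w => w.toList)) = C := by
    rw [hC, show d.values = d.items.map Prod.snd from rfl, List.flatMap_map]
  rw [hCvals]
  set letters : List String :=
    (C.filter (fun c => !(PySem.Set.contains (PySem.Set.ofList d.keys) c.toString))).map
      Char.toString with hlet
  -- the filter on chars is the filter 'not a key' on the mapped strings
  have hfilt : letters = (C.map Char.toString).filter (fun s => decide (s ∉ d.keys)) := by
    rw [hlet, List.filter_map]
    congr 1
    apply List.filter_congr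
    intro c _
    simp only [Function.comp]
    by_cases h : c.toString ∈ d.keys
    · rw [show PySem.Set.contains (PySem.Set.ofList d.keys) c.toString = true from
        (PySem.Set.contains_iff _ _).mpr ((PySem.Set.mem_ofList d.keys c.toString).mpr h)]
      simpa
    · rw [show PySem.Set.contains (PySem.Set.ofList d.keys) c.toString = false by
        rw [Bool.eq_false_iff]
        intro hc
        exact h ((PySem.Set.mem_ofList d.keys c.toString).mp ((PySem.Set.contains_iff _ _).mp hc))]
      simpa
  -- A's tokens = keys ++ set(letters)
  have hsplit : T = d.keys ++ PySem.Set.ofList letters := by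
    have h := splitSeen (C.map Char.toString) d.keys [] (by simp)
    rw [List.append_nil] at h
    rw [hflat, h, PySem.Set.ofList_eq_foldl, hfilt]
  -- the sort by first occurrence is the identity on set(letters)
  have hsort : PySem.List.sorted (PySem.Set.ofList letters)
      (fun t => (PySem.List.index? letters t).getD 0) false = PySem.Set.ofList letters :=
    PySem.List.sorted_eq_of_perm_of_pairwise_lt _ _ _ (List.Perm.refl _)
      (pairwise_index_ofList letters)
  rw [hsort, ← hsplit]
  -- both sides are the numbering of T
  rw [show ((PySem.List.enumerate T 0).map (fun p => (p.2, PySem.Int.toStr (count + p.1))))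
      = numb count T from rfl]
  rw [items_ofList_of_nodup _ (by rw [map_fst_numb]; exact hmainNd)]
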